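-- pv_equiv track=rewrite | github.com/Madaminof/Codewars_Example | algorithm.py | Dict_Values_Dublicate_Print_Sort_Keys
-- ===== SOURCE A (Python) =====
-- def Dict_Values_Dublicate_Print_Sort_Keys(n):
--     l1 = []
--     result=[]
--     for i in n:
--         for j in i.values():
--             l1.append(j)
--     for i in l1:
--         for j in lists:
--             for key,value in j.items():
--                 if l1.count(i)==2 and value==i:
--                     result.append(key)
--     result1=set(result)
--     return sorted(result1)
--
-- lists=[{"ali":20},{"toms":55},{"john":20},{"sardor":11},{"bobir":55}]
-- ===== SOURCE B (Python) =====
-- def Dict_Values_Dublicate_Print_Sort_Keys(n):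
--     # inverted index over the global `lists`: value -> all keys carrying it
--     index = {}
--     for d in lists:
--         for key, value in d.items():
--             index.setdefault(value, []).append(key)
--     # one-pass frequency table of all values pulled from n
--     counts = {}
--     for d in n:
--         for v in d.values():
--             counts[v] = counts.get(v, 0) + 1
--     result = []
--     for v, c in counts.items():
--         if c == 2:
--             result.extend(index.get(v, []))
--     return sorted(set(result))
--
-- lists = [{"ali": 20}, {"toms": 55}, {"john": 20}, {"sardor": 11}, {"bobir": 55}]
-- ===== Notes on version B (the rewrite author's own statement) =====
-- stated objective: faster
-- what changed: Replaced A's triple loop that calls l1.count(i) for every value occurrence and every entry of the global lists with a single-pass frequency dict over the values of n plus an inverted index value->keys built once from lists, extending the result only for values whose frequency is exactly 2.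
import Mathlib
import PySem

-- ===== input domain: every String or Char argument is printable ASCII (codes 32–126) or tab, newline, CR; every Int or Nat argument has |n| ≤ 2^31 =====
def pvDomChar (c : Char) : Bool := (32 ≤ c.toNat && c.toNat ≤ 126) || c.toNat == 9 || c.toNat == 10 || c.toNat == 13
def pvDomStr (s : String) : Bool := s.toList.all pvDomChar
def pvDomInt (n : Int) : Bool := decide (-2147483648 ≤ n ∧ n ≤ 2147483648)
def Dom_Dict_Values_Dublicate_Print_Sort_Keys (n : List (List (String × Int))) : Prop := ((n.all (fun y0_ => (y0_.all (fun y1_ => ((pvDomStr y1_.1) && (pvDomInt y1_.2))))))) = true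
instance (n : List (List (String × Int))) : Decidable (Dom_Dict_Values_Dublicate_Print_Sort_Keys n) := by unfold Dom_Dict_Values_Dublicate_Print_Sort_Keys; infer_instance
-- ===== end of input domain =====

-- B replaces A's quadratic rescans (l1.count inside a triple loop over l1 × lists) by a one-pass
-- frequency dict over the values of n plus an inverted index value→keys over the global `lists`.

-- ===== PORT A =====
-- the module-level global `lists`
def pvLists : List (PySem.Dict String Int) :=
  [PySem.Dict.mk [("ali", 20)], PySem.Dict.mk [("toms", 55)], PySem.Dict.mk [("john", 20)],
   PySem.Dict.mk [("sardor", 11)], PySem.Dict.mk [("bobir", 55)]]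

def Dict_Values_Dublicate_Print_Sort_Keys (n : List (List (String × Int))) : List String :=
  let l1 := n.foldl (fun acc i => (PySem.Dict.ofList i).values.foldl (fun acc j => acc ++ [j]) acc) []
  let result := l1.foldl (fun res i =>
      pvLists.foldl (fun res j =>
        j.items.foldl (fun res kv =>
          if l1.count i == 2 && kv.2 == i then res ++ [kv.1] else res) res) res) []
  PySem.List.sorted (PySem.Set.ofList result) (fun x => x) false

-- ===== PORT B =====
def Dict_Values_Dublicate_Print_Sort_Keys_alt (n : List (List (String × Int))) : List String :=
  let index := pvLists.foldl (fun ix d =>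
      d.items.foldl (fun ix kv => ix.modify kv.2 [] (fun ks => ks ++ [kv.1])) ix) PySem.Dict.empty
  let counts := n.foldl (fun c d =>
      (PySem.Dict.ofList d).values.foldl (fun c v => c.insert v (c.getD v 0 + 1)) c) PySem.Dict.empty
  let result := counts.items.foldl (fun res p =>
      if p.2 == (2 : Int) then res ++ index.getD p.1 [] else res) []
  PySem.List.sorted (PySem.Set.ofList result) (fun x => x) false

-- ===== PRECONDITION & SPEC =====
def Spec_Dict_Values_Dublicate_Print_Sort_Keys (n : List (List (String × Int))) (out : List String) : Prop := out = Dict_Values_Dublicate_Print_Sort_Keys_alt n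
instance (n : List (List (String × Int))) (out : List String) : Decidable (Spec_Dict_Values_Dublicate_Print_Sort_Keys n out) := by unfold Spec_Dict_Values_Dublicate_Print_Sort_Keys; infer_instance

-- ===== CLAIM (what is proved, stated in full; the proofs are below) =====
def Claim_equal_Dict_Values_Dublicate_Print_Sort_Keys : Prop := ∀ (n : List (List (String × Int))), Dom_Dict_Values_Dublicate_Print_Sort_Keys n → Spec_Dict_Values_Dublicate_Print_Sort_Keys n (Dict_Values_Dublicate_Print_Sort_Keys n)

-- ===== LEMMAS AND PROOFS =====

-- the flat list of all values drawn from n (both programs traverse n in this order)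
def pvVals (n : List (List (String × Int))) : List Int :=
  n.flatMap (fun i => (PySem.Dict.ofList i).values)

-- A's first loop builds exactly pvVals n
theorem pv_l1_eq (n : List (List (String × Int))) :
    n.foldl (fun acc i => (PySem.Dict.ofList i).values.foldl (fun acc j => acc ++ [j]) acc) []
      = pvVals n := by
  have hin : ∀ (l : List Int) (a : List Int), l.foldl (fun a j => a ++ [j]) a = a ++ l := by
    intro l
    induction l with
    | nil => intro a; simp
    | cons x xs ihx => intro a; simp [ihx]
  rw [PySem.List.foldl_congr_mem _ _ (fun acc i => acc ++ (PySem.Dict.ofList i).values) _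
    (fun acc i _ => hin _ acc)]
  simpa [pvVals] using PySem.List.foldl_append_eq_flatMap
    (fun i : List (String × Int) => (PySem.Dict.ofList i).values) n []

-- B's counting loop is Counter(pvVals n)
theorem pv_counts_eq (n : List (List (String × Int))) :
    n.foldl (fun c d =>
        (PySem.Dict.ofList d).values.foldl (fun c v => c.insert v (c.getD v 0 + 1)) c) PySem.Dict.empty
      = PySem.Dict.counter (pvVals n) := by
  rw [← PySem.Dict.foldl_insert_getD_add_one_eq_counter, pvVals, List.foldl_flatMap]

-- the entries of the global `lists`, flattened
def pvEntries : List (String × Int) :=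
  [("ali", 20), ("toms", 55), ("john", 20), ("sardor", 11), ("bobir", 55)]

-- B's inverted index, evaluated (pvLists is a literal)
theorem pv_index_eq :
    pvLists.foldl (fun ix d =>
        d.items.foldl (fun ix kv => ix.modify kv.2 [] (fun ks => ks ++ [kv.1])) ix) PySem.Dict.empty
      = PySem.Dict.mk [(20, ["ali", "john"]), (55, ["toms", "bobir"]), (11, ["sardor"])] := by
  decide

theorem pv_index_getD (v : Int) :
    (PySem.Dict.mk [((20 : Int), ["ali", "john"]), (55, ["toms", "bobir"]), (11, ["sardor"])]).getD v []
      = if v = 20 then ["ali", "john"] else if v = 55 then ["toms", "bobir"] else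
        if v = 11 then ["sardor"] else [] := by
  by_cases h20 : v = 20
  · subst h20; rfl
  by_cases h55 : v = 55
  · subst h55; rfl
  by_cases h11 : v = 11
  · subst h11; rfl
  have b20 : ((20 : Int) == v) = false := by simp [Ne.symm h20]
  have b55 : ((55 : Int) == v) = false := by simp [Ne.symm h55]
  have b11 : ((11 : Int) == v) = false := by simp [Ne.symm h11]
  simp [PySem.Dict.getD, PySem.Dict.get?_mk_cons, b20, b55, b11, h20, h55, h11]
  rfl

-- membership in A's result list
theorem pv_memA (L : List Int) (k : String) :
    (k ∈ L.foldl (fun res i =>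
        pvLists.foldl (fun res j =>
          j.items.foldl (fun res kv =>
            if L.count i == 2 && kv.2 == i then res ++ [kv.1] else res) res) res) [])
      ↔ ∃ i ∈ L, L.count i = 2 ∧
          ((i = 20 ∧ (k = "ali" ∨ k = "john")) ∨ (i = 55 ∧ (k = "toms" ∨ k = "bobir")) ∨
           (i = 11 ∧ k = "sardor")) := by
  have hflat : ∀ (res : List String) (i : Int),
      pvLists.foldl (fun res j =>
          j.items.foldl (fun res kv =>
            if L.count i == 2 && kv.2 == i then res ++ [kv.1] else res) res) res
        = res ++ (pvEntries.filter (fun kv => L.count i == 2 && kv.2 == i)).map (·.1) := by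
    intro res i
    rw [← List.foldl_flatMap (f := fun j : PySem.Dict String Int => j.items)]
    exact PySem.List.foldl_append_if _ _ _ _
  have h2 : L.foldl (fun res i =>
        pvLists.foldl (fun res j =>
          j.items.foldl (fun res kv =>
            if L.count i == 2 && kv.2 == i then res ++ [kv.1] else res) res) res) []
      = L.flatMap (fun i => (pvEntries.filter (fun kv => L.count i == 2 && kv.2 == i)).map (·.1)) := by
    have := PySem.List.foldl_append_eq_flatMap
      (fun i => (pvEntries.filter (fun kv => L.count i == 2 && kv.2 == i)).map (·.1)) L []
    simp only [List.nil_append] at this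
    rw [← this]
    exact PySem.List.foldl_congr_mem _ _ _ _ (fun res i _ => hflat res i)
  rw [h2]
  simp only [List.mem_flatMap, List.mem_map, List.mem_filter, pvEntries]
  constructor
  · rintro ⟨i, hi, kv, ⟨hmem, hcond⟩, hk⟩
    simp only [Bool.and_eq_true, beq_iff_eq] at hcond
    refine ⟨i, hi, hcond.1, ?_⟩
    fin_cases hmem <;> simp_all
  · rintro ⟨i, hi, hc, hcase⟩
    rcases hcase with ⟨h, hk | hk⟩ | ⟨h, hk | hk⟩ | ⟨h, hk⟩ <;>
      subst h <;> subst hk <;>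
      first
      | exact ⟨20, hi, ("ali", 20), by simp [hc], rfl⟩
      | exact ⟨20, hi, ("john", 20), by simp [hc], rfl⟩
      | exact ⟨55, hi, ("toms", 55), by simp [hc], rfl⟩
      | exact ⟨55, hi, ("bobir", 55), by simp [hc], rfl⟩
      | exact ⟨11, hi, ("sardor", 11), by simp [hc], rfl⟩

-- membership in B's result list
theorem pv_memB (L : List Int) (k : String) :
    (k ∈ (PySem.Dict.counter L).items.foldl (fun res p =>
        if p.2 == (2 : Int) then
          res ++ (PySem.Dict.mk [((20 : Int), ["ali", "john"]), (55, ["toms", "bobir"]), (11, ["sardor"])]).getD p.1 []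
        else res) [])
      ↔ ∃ i ∈ L, L.count i = 2 ∧
          ((i = 20 ∧ (k = "ali" ∨ k = "john")) ∨ (i = 55 ∧ (k = "toms" ∨ k = "bobir")) ∨
           (i = 11 ∧ k = "sardor")) := by
  have hstep : ∀ (res : List String) (p : Int × Int),
      (if p.2 == (2 : Int) then
          res ++ (PySem.Dict.mk [((20 : Int), ["ali", "john"]), (55, ["toms", "bobir"]), (11, ["sardor"])]).getD p.1 []
        else res)
      = res ++ (if p.2 == (2 : Int) then
          (PySem.Dict.mk [((20 : Int), ["ali", "john"]), (55, ["toms", "bobir"]), (11, ["sardor"])]).getD p.1 []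
        else []) := by
    intro res p; split <;> simp
  rw [PySem.List.foldl_congr_mem _ _ _ _ (fun res p _ => hstep res p),
    PySem.List.foldl_append_eq_flatMap, List.nil_append, PySem.Dict.items_counter]
  simp only [List.mem_flatMap, List.mem_map, PySem.Set.mem_ofList]
  constructor
  · rintro ⟨p, ⟨i, hi, rfl⟩, hk⟩
    by_cases hc : L.count i = 2
    · refine ⟨i, hi, hc, ?_⟩
      rw [pv_index_getD] at hk
      simp only [hc] at hk
      by_cases h20 : i = 20 <;> by_cases h55 : i = 55 <;> by_cases h11 : i = 11 <;>
        simp_all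
    · exfalso
      have : ((L.count i : Int) == 2) = false := by
        simp only [beq_eq_false_iff_ne, ne_eq]
        exact_mod_cast hc
      simp [this] at hk
  · rintro ⟨i, hi, hc, hcase⟩
    refine ⟨(i, (L.count i : Int)), ⟨i, hi, rfl⟩, ?_⟩
    have hb : ((L.count i : Int) == 2) = true := by
      simp only [beq_iff_eq]; exact_mod_cast hc
    rw [hb, if_pos rfl, pv_index_getD]
    rcases hcase with ⟨h, hk⟩ | ⟨h, hk⟩ | ⟨h, hk⟩ <;> subst h <;> simp_all

-- ===== VERDICT (by name: the statement is the Claim_ definition above) =====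
theorem Dict_Values_Dublicate_Print_Sort_Keys_spec : Claim_equal_Dict_Values_Dublicate_Print_Sort_Keys := by
  intro n _
  unfold Spec_Dict_Values_Dublicate_Print_Sort_Keys
  unfold Dict_Values_Dublicate_Print_Sort_Keys Dict_Values_Dublicate_Print_Sort_Keys_alt
  simp only [pv_l1_eq, pv_counts_eq, pv_index_eq]
  apply PySem.List.sorted_eq_sorted_of_perm _ _ _ (fun a b h => h)
  rw [List.perm_ext_iff_of_nodup (PySem.Set.nodup_ofList _) (PySem.Set.nodup_ofList _)]
  intro k
  rw [PySem.Set.mem_ofList, PySem.Set.mem_ofList, pv_memA, pv_memB]
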